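-- pv_equiv track=rewrite | github.com/cpoerschke/bee-informatics | bedtime-for-bees/bee-step-stats.py | metric_values_map
-- ===== SOURCE A (Python) =====
-- def metric_values_map(buckets, metrics):
--
--   vals_map = {}
--
--   def get_val(bucket, key):
--     if key in bucket:
--       return bucket[key]
--     else:
--       return None
--
--   def add_bucket_vals(key):
--     vals_map[key] = { "x" : [], "y" : [] }
--     for ii in range(0,len(buckets)): # time slices
--       val = get_val(buckets[ii], key)
--       if val != None:
--         vals_map[key]["x"].append(ii)
--         vals_map[key]["y"].append(val)
--
--   # for each metric get two lists:
--   # --> x list is the time slots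
--   # --> y list is the metric value for each time slot
--
--   for metric in metrics:
--     add_bucket_vals(metric)
--
--   return vals_map
-- ===== SOURCE B (Python) =====
-- def metric_values_map(buckets, metrics):
--   # Inverted traversal: one pass over buckets, set membership for metrics.
--   metric_set = set(metrics)
--   vals_map = {m: {"x": [], "y": []} for m in metrics}
--   for ii, bucket in enumerate(buckets):
--     for key in bucket:
--       if key in metric_set:
--         vals_map[key]["x"].append(ii)
--         vals_map[key]["y"].append(bucket[key])
--   return vals_map
-- ===== Notes on version B (the rewrite author's own statement) =====
-- stated objective: faster
-- what changed: Inverted loop nesting: instead of scanning all buckets once per metric, B pre-initializes empty entries for every metric and makes a single pass over the buckets, dispatching each bucket key through a metric set.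
import Mathlib
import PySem

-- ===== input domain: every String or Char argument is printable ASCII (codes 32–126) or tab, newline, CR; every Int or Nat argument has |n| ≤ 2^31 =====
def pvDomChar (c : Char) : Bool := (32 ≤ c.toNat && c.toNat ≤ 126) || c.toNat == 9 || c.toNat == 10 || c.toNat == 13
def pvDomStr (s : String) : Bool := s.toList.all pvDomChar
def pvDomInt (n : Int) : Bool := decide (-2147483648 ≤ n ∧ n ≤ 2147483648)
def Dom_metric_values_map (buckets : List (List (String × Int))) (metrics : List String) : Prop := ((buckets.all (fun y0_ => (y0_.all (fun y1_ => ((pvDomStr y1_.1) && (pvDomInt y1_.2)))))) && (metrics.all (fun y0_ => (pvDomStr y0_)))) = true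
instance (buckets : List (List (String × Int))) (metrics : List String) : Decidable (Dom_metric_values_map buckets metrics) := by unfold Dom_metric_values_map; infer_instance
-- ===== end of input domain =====

-- B inverts A's loop nesting (single pass over buckets, metric-set membership) — same result; one pass over the buckets instead of one per metric.

-- ===== PORT A =====
-- get_val(bucket, key): bucket[key] if key in bucket else None
def pvGetVal (bucket : PySem.Dict String Int) (key : String) : Option Int :=
  if bucket.contains key then bucket.get? key else none

-- add_bucket_vals(key): vals_map[key] = {"x": [], "y": []}; then for ii in range(0, len(buckets)) append.
-- The fixed-key inner dict {"x": xs, "y": ys} is carried as the pair (xs, ys) and rendered as [("x", xs), ("y", ys)] on return.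
def pvAddBucketVals (buckets : List (List (String × Int))) (key : String)
    (vm : PySem.Dict String (List Int × List Int)) : PySem.Dict String (List Int × List Int) :=
  (PySem.List.pyRange 0 (PySem.List.len buckets)).foldl
    (fun vm ii =>
      match pvGetVal (PySem.Dict.ofList (PySem.List.pyGetD buckets ii [])) key with
      | none => vm
      | some val => vm.modify key ([], []) (fun p => (p.1 ++ [ii], p.2 ++ [val])))
    (vm.insert key ([], []))

def metric_values_map (buckets : List (List (String × Int))) (metrics : List String) :
    List (String × List (String × List Int)) :=
  (metrics.foldl (fun vm m => pvAddBucketVals buckets m vm) PySem.Dict.empty).items.map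
    (fun p => (p.1, [("x", p.2.1), ("y", p.2.2)]))

-- ===== PORT B =====
-- vals_map = {m: {"x": [], "y": []} for m in metrics}
def pvInitMap (metrics : List String) : PySem.Dict String (List Int × List Int) :=
  metrics.foldl (fun vm m => vm.insert m ([], [])) PySem.Dict.empty

-- one bucket of the enumerate pass: for key in bucket: if key in metric_set: append
def pvBucketStep (mset : PySem.Set String) (vm : PySem.Dict String (List Int × List Int))
    (pr : Int × List (String × Int)) : PySem.Dict String (List Int × List Int) :=
  let d := PySem.Dict.ofList pr.2
  d.keys.foldl
    (fun vm key =>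
      if mset.contains key then
        vm.modify key ([], []) (fun p => (p.1 ++ [pr.1], p.2 ++ [d.getD key 0]))
      else vm)
    vm

def metric_values_map_alt (buckets : List (List (String × Int))) (metrics : List String) :
    List (String × List (String × List Int)) :=
  ((PySem.List.enumerate buckets).foldl (pvBucketStep (PySem.Set.ofList metrics)) (pvInitMap metrics)).items.map
    (fun p => (p.1, [("x", p.2.1), ("y", p.2.2)]))

-- ===== PRECONDITION & SPEC =====
def Spec_metric_values_map (buckets : List (List (String × Int))) (metrics : List String) (out : List (String × List (String × List Int))) : Prop := out = metric_values_map_alt buckets metrics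
instance (buckets : List (List (String × Int))) (metrics : List String) (out : List (String × List (String × List Int))) : Decidable (Spec_metric_values_map buckets metrics out) := by unfold Spec_metric_values_map; infer_instance

-- ===== CLAIM (what is proved, stated in full; the proofs are below) =====
def Claim_equal_metric_values_map : Prop := ∀ (buckets : List (List (String × Int))) (metrics : List String), Dom_metric_values_map buckets metrics → Spec_metric_values_map buckets metrics (metric_values_map buckets metrics)

-- ===== LEMMAS AND PROOFS =====

-- the per-metric (x, y) pair both programs compute
def pvFill (buckets : List (List (String × Int))) (m : String) : List Int × List Int :=
  (PySem.List.enumerate buckets).foldl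
    (fun p pr =>
      let d := PySem.Dict.ofList pr.2
      if d.contains m then (p.1 ++ [pr.1], p.2 ++ [d.getD m 0]) else p)
    ([], [])

lemma get?_eq_some_getD (d : PySem.Dict String Int) (k : String) (h : d.contains k = true) :
    d.get? k = some (d.getD k 0) := by
  cases hg : d.get? k with
  | none => rw [PySem.Dict.get?_eq_none_iff_contains] at hg; simp [hg] at h
  | some v => simp [PySem.Dict.getD_eq_get?_getD, hg]

lemma insert_insert_self (d : PySem.Dict String (List Int × List Int)) (k : String)
    (v w : List Int × List Int) : (d.insert k v).insert k w = d.insert k w := by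
  apply PySem.Dict.ext
  have h1 : (d.insert k v).contains k = true := PySem.Dict.contains_insert_self d k v
  cases hc : d.contains k with
  | true =>
    rw [PySem.Dict.items_insert_of_contains _ _ h1, PySem.Dict.items_insert_of_contains _ _ hc,
        PySem.Dict.items_insert_of_contains _ _ hc, List.map_map]
    apply List.map_congr_left
    intro p _
    by_cases hp : p.1 = k <;> simp [hp]
  | false =>
    rw [PySem.Dict.items_insert_of_contains _ _ h1, PySem.Dict.items_insert_of_not_contains _ _ hc,
        PySem.Dict.items_insert_of_not_contains _ _ hc, List.map_append]
    have hmap : List.map (fun p => if (p.1 == k) = true then (k, w) else p) d.items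
        = List.map id d.items := by
      apply List.map_congr_left
      intro p hp
      have hne : p.1 ≠ k := by
        intro he
        have hk : k ∈ d.keys := by
          simp only [PySem.Dict.keys]
          exact List.mem_map.2 ⟨p, hp, he⟩
        rw [← PySem.Dict.contains_iff_mem_keys] at hk
        simp [hk] at hc
      simp [hne]
    rw [hmap, List.map_id]
    simp

-- a fold that only ever modifies one fixed key factors through insert
lemma foldl_modify_fixed_key {ι : Type} (l : List ι) (key : String)
    (c : ι → Bool) (h : ι → (List Int × List Int) → List Int × List Int)
    (vm : PySem.Dict String (List Int × List Int)) (e : List Int × List Int) :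
    l.foldl (fun vm j => if c j then vm.modify key ([], []) (h j) else vm) (vm.insert key e)
      = vm.insert key (l.foldl (fun p j => if c j then h j p else p) e) := by
  induction l generalizing e with
  | nil => rfl
  | cons j l ih =>
    simp only [List.foldl_cons]
    cases hc : c j with
    | false =>
      simp only [Bool.false_eq_true, if_false]
      exact ih e
    | true =>
      rw [if_pos rfl, if_pos rfl]
      have hmod : (vm.insert key e).modify key ([], []) (h j) = vm.insert key (h j e) := by
        simp only [PySem.Dict.modify, PySem.Dict.getD_insert_self, insert_insert_self]
      rw [hmod]
      exact ih (h j e)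

lemma addBucketVals_eq_insert_fill (buckets : List (List (String × Int))) (key : String)
    (vm : PySem.Dict String (List Int × List Int)) :
    pvAddBucketVals buckets key vm = vm.insert key (pvFill buckets key) := by
  unfold pvAddBucketVals pvFill
  rw [PySem.List.enumerate_eq_map_pyRange buckets [], List.foldl_map]
  have hstep : ∀ (vm : PySem.Dict String (List Int × List Int)) (ii : Int),
      (match pvGetVal (PySem.Dict.ofList (PySem.List.pyGetD buckets ii [])) key with
        | none => vm
        | some val => vm.modify key ([], []) (fun p => (p.1 ++ [ii], p.2 ++ [val])))
      = (if (PySem.Dict.ofList (PySem.List.pyGetD buckets ii [])).contains key then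
          vm.modify key ([], [])
            (fun p => (p.1 ++ [ii], p.2 ++ [(PySem.Dict.ofList (PySem.List.pyGetD buckets ii [])).getD key 0]))
        else vm) := by
    intro vm ii
    unfold pvGetVal
    cases hc : (PySem.Dict.ofList (PySem.List.pyGetD buckets ii [])).contains key with
    | false => simp
    | true => simp [get?_eq_some_getD _ _ hc]
  calc (PySem.List.pyRange 0 (PySem.List.len buckets)).foldl
        (fun vm ii =>
          match pvGetVal (PySem.Dict.ofList (PySem.List.pyGetD buckets ii [])) key with
          | none => vm
          | some val => vm.modify key ([], []) (fun p => (p.1 ++ [ii], p.2 ++ [val])))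
        (vm.insert key ([], []))
      = (PySem.List.pyRange 0 (PySem.List.len buckets)).foldl
        (fun vm ii =>
          if (PySem.Dict.ofList (PySem.List.pyGetD buckets ii [])).contains key then
            vm.modify key ([], [])
              (fun p => (p.1 ++ [ii], p.2 ++ [(PySem.Dict.ofList (PySem.List.pyGetD buckets ii [])).getD key 0]))
          else vm)
        (vm.insert key ([], [])) := by
        exact PySem.List.foldl_congr_mem _ _ _ _ (fun acc ii _ => hstep acc ii)
    _ = _ := by
        rw [foldl_modify_fixed_key]

-- a fold of inserts whose value depends only on the key, from a dict whose items are a nodup-key table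
lemma foldl_insert_items (v : String → List Int × List Int) (ms : List String)
    (s : List String) (d : PySem.Dict String (List Int × List Int))
    (hs : s.Nodup) (hd : d.items = s.map (fun m => (m, v m))) :
    (ms.foldl (fun d m => d.insert m (v m)) d).items
      = (PySem.Set.update s ms).map (fun m => (m, v m)) := by
  induction ms generalizing s d with
  | nil => simpa [PySem.Set.update] using hd
  | cons m ms ih =>
    have hkeys : d.keys = s := by
      simp only [PySem.Dict.keys, hd, List.map_map]
      exact (List.map_congr_left (fun x _ => rfl)).trans (List.map_id s)
    have hmem : d.contains m = true ↔ m ∈ s := by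
      rw [PySem.Dict.contains_iff_mem_keys, hkeys]
    simp only [List.foldl_cons, PySem.Set.update, List.foldl_cons]
    cases hc : d.contains m with
    | true =>
      have hm : m ∈ s := hmem.1 hc
      have hadd : PySem.Set.add s m = s := by
        simp [PySem.Set.add, hm]
      have hitems : (d.insert m (v m)).items = s.map (fun x => (x, v x)) := by
        rw [PySem.Dict.items_insert_of_contains _ _ hc, hd, List.map_map]
        apply List.map_congr_left
        intro x _
        by_cases hx : x = m <;> simp [hx]
      have := ih s (d.insert m (v m)) hs hitems
      simpa [PySem.Set.update, hadd] using this
    | false =>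
      have hm : m ∉ s := fun h => by simp [hmem.2 h] at hc
      have hitems : (d.insert m (v m)).items = (s ++ [m]).map (fun x => (x, v x)) := by
        rw [PySem.Dict.items_insert_of_not_contains _ _ hc, hd, List.map_append, List.map_singleton]
      have hnodup : (s ++ [m]).Nodup := by
        rw [List.nodup_append]
        refine ⟨hs, List.nodup_singleton m, ?_⟩
        intro a ha b hb
        rw [List.mem_singleton] at hb
        subst hb
        exact fun heq => hm (heq ▸ ha)
      have hadd : PySem.Set.add s m = s ++ [m] := by
        simp [PySem.Set.add, hm]
      have := ih (s ++ [m]) (d.insert m (v m)) hnodup hitems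
      simpa [PySem.Set.update, hadd] using this

lemma metric_values_map_items (buckets : List (List (String × Int))) (metrics : List String) :
    (metrics.foldl (fun vm m => pvAddBucketVals buckets m vm) PySem.Dict.empty).items
      = (PySem.Set.ofList metrics).map (fun m => (m, pvFill buckets m)) := by
  have h1 : metrics.foldl (fun vm m => pvAddBucketVals buckets m vm) PySem.Dict.empty
      = metrics.foldl (fun vm m => vm.insert m (pvFill buckets m)) PySem.Dict.empty := by
    exact PySem.List.foldl_congr_mem _ _ _ _
      (fun vm m _ => addBucketVals_eq_insert_fill buckets m vm)
  rw [h1, foldl_insert_items (fun m => pvFill buckets m) metrics [] PySem.Dict.empty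
    List.nodup_nil rfl]
  rfl

-- B side: one bucket's key loop updates exactly the keys of the bucket that are in mset
lemma foldl_keyloop_items (mset : PySem.Set String) (jj : Int) (d' : PySem.Dict String Int)
    (ks : List String) (hk : ks.Nodup)
    (s : List String) (hs : s.Nodup) (hsub : ∀ k, k ∈ mset → k ∈ s)
    (G : String → List Int × List Int)
    (d : PySem.Dict String (List Int × List Int)) (hd : d.items = s.map (fun m => (m, G m))) :
    (ks.foldl
      (fun vm key =>
        if mset.contains key then
          vm.modify key ([], []) (fun p => (p.1 ++ [jj], p.2 ++ [d'.getD key 0]))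
        else vm) d).items
      = s.map (fun m => (m, if mset.contains m && decide (m ∈ ks)
          then ((G m).1 ++ [jj], (G m).2 ++ [d'.getD m 0]) else G m)) := by
  induction ks generalizing G d with
  | nil =>
    simp only [List.foldl_nil, hd]
    apply List.map_congr_left
    intro m _
    simp
  | cons k ks ih =>
    have hknodup : ks.Nodup := hk.of_cons
    have hknotin : k ∉ ks := by simp at hk; exact hk.1
    simp only [List.foldl_cons]
    cases hc : mset.contains k with
    | false =>
      simp only [Bool.false_eq_true, if_false]
      rw [ih hknodup G d hd]
      apply List.map_congr_left
      intro m hm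
      by_cases hmk : m = k
      · subst hmk
        have hcm : m ∉ mset := by simpa using hc
        simp [hcm]
      · simp [List.mem_cons, hmk]
    | true =>
      have hkin : k ∈ s := hsub k (by simpa using hc)
      have hkeys : d.keys = s := by
        simp only [PySem.Dict.keys, hd, List.map_map]
        exact (List.map_congr_left (fun x _ => rfl)).trans (List.map_id s)
      have hcont : d.contains k = true := by
        rw [PySem.Dict.contains_iff_mem_keys, hkeys]; exact hkin
      have hgetD : d.getD k ([], []) = G k := by
        apply PySem.Dict.getD_of_mem_items
        · rw [hd]; exact List.mem_map.2 ⟨k, hkin, rfl⟩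
        · rw [hkeys]; exact hs
      set G' : String → List Int × List Int :=
        fun m => if m = k then ((G k).1 ++ [jj], (G k).2 ++ [d'.getD k 0]) else G m with hG'
      have hitems : (d.modify k ([], [])
          (fun p => (p.1 ++ [jj], p.2 ++ [d'.getD k 0]))).items = s.map (fun m => (m, G' m)) := by
        rw [PySem.Dict.modify, hgetD, PySem.Dict.items_insert_of_contains _ _ hcont, hd,
          List.map_map]
        apply List.map_congr_left
        intro x _
        by_cases hx : x = k <;> simp [hx, hG']
      rw [if_pos rfl, ih hknodup G' _ hitems]
      apply List.map_congr_left
      intro m hm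
      by_cases hmk : m = k
      · subst hmk
        have hcm : m ∈ mset := by simpa using hc
        simp [hG', hcm, hknotin]
      · simp only [hG', if_neg hmk, List.mem_cons]
        simp [hmk]

lemma foldl_bucketStep_items (mset : PySem.Set String) (bl : List (Int × List (String × Int)))
    (s : List String) (hs : s.Nodup) (hsub : ∀ k, k ∈ mset → k ∈ s)
    (G : String → List Int × List Int)
    (d : PySem.Dict String (List Int × List Int)) (hd : d.items = s.map (fun m => (m, G m))) :
    (bl.foldl (pvBucketStep mset) d).items
      = s.map (fun m => (m,
          bl.foldl (fun p pr =>
            let d' := PySem.Dict.ofList pr.2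
            if mset.contains m && d'.contains m then (p.1 ++ [pr.1], p.2 ++ [d'.getD m 0]) else p)
            (G m))) := by
  induction bl generalizing G d with
  | nil =>
    simpa using hd
  | cons pr bl ih =>
    simp only [List.foldl_cons]
    set d' := PySem.Dict.ofList pr.2 with hd'
    have hkeysNodup : d'.keys.Nodup := PySem.Dict.nodup_keys_ofList pr.2
    have hstep := foldl_keyloop_items mset pr.1 d' d'.keys hkeysNodup s hs hsub G d hd
    set G1 : String → List Int × List Int :=
      fun m => if mset.contains m && decide (m ∈ d'.keys)
        then ((G m).1 ++ [pr.1], (G m).2 ++ [d'.getD m 0]) else G m with hG1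
    have hstep' : (pvBucketStep mset d pr).items = s.map (fun m => (m, G1 m)) := by
      unfold pvBucketStep
      exact hstep
    rw [ih G1 _ hstep']
    apply List.map_congr_left
    intro m hm
    congr 1
    simp only [hG1]
    by_cases h1 : m ∈ mset
    · by_cases h2 : m ∈ d'.keys
      · have hb2 : d'.contains m = true := by rw [PySem.Dict.contains_iff_mem_keys]; exact h2
        simp [h1, h2, hb2]
      · have hb2 : ¬ d'.contains m = true := by rw [PySem.Dict.contains_iff_mem_keys]; exact h2
        simp [h1, h2, hb2]
    · simp [h1]

lemma initMap_items (metrics : List String) :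
    (pvInitMap metrics).items = (PySem.Set.ofList metrics).map (fun m => (m, (([], []) : List Int × List Int))) := by
  unfold pvInitMap
  rw [foldl_insert_items (fun _ => ([], [])) metrics [] PySem.Dict.empty
    List.nodup_nil rfl]
  rfl

lemma metric_values_map_alt_items (buckets : List (List (String × Int))) (metrics : List String) :
    ((PySem.List.enumerate buckets).foldl (pvBucketStep (PySem.Set.ofList metrics)) (pvInitMap metrics)).items
      = (PySem.Set.ofList metrics).map (fun m => (m, pvFill buckets m)) := by
  rw [foldl_bucketStep_items (PySem.Set.ofList metrics) (PySem.List.enumerate buckets)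
    (PySem.Set.ofList metrics) (PySem.Set.nodup_ofList metrics) (fun k hk => hk)
    (fun _ => ([], [])) (pvInitMap metrics) (initMap_items metrics)]
  apply List.map_congr_left
  intro m hm
  congr 1
  unfold pvFill
  have hmm : m ∈ metrics := (PySem.Set.mem_ofList metrics m).1 hm
  exact PySem.List.foldl_congr_mem _ _ _ _ (fun acc x _ => by simp [hmm])

-- ===== VERDICT (by name: the statement is the Claim_ definition above) =====
theorem metric_values_map_spec : Claim_equal_metric_values_map := by
  intro buckets metrics _
  unfold Spec_metric_values_map metric_values_map metric_values_map_alt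
  rw [metric_values_map_items, metric_values_map_alt_items]
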